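-- pv_equiv track=rewrite | github.com/nnigam19/PrestoQueryConverter | src/utils/presto_functions.py | convert_date_format_pattern
-- ===== SOURCE A (Python) =====
-- def convert_date_format_pattern(pattern: str) -> str:
--     """
--     Convert legacy date format patterns (Spark 2.x / Presto style with % prefix)
--     to Spark 3.0+ Java DateTimeFormatter patterns.
--
--     Args:
--         pattern: Date format pattern string (e.g., '%Y-%m-%d' or 'yyyy-MM-dd')
--
--     Returns:
--         Converted pattern compatible with Spark 3.0+ (e.g., 'yyyy-MM-dd')
--
--     Examples:
--         '%Y-%m-%d' -> 'yyyy-MM-dd'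
--         '%m/%d/%Y' -> 'MM/dd/yyyy'
--         '%Y-%m-%d %H:%i:%s' -> 'yyyy-MM-dd HH:mm:ss'
--     """
--     if '%' not in pattern:
--         return pattern
--
--     # Mapping from legacy patterns to Spark 3.0+ patterns
--     conversions = [
--         ('%Y', 'yyyy'),      # 4-digit year
--         ('%y', 'yy'),        # 2-digit year
--         ('%m', 'MM'),        # 2-digit month
--         ('%d', 'dd'),        # 2-digit day
--         ('%H', 'HH'),        # 2-digit hour (24-hour)
--         ('%h', 'hh'),        # 2-digit hour (12-hour)
--         ('%i', 'mm'),        # 2-digit minute (Presto uses %i)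
--         ('%M', 'mm'),        # 2-digit minute (some systems use %M)
--         ('%s', 'ss'),        # 2-digit second
--         ('%S', 'ss'),        # 2-digit second (alternative)
--         ('%p', 'a'),         # AM/PM marker
--         ('%W', 'EEEE'),      # Full weekday name
--         ('%w', 'e'),         # Day of week (1-7)
--         ('%b', 'MMM'),       # Abbreviated month name
--         ('%B', 'MMMM'),      # Full month name
--         ('%j', 'DDD'),       # Day of year
--     ]
--
--     result = pattern
--     for old, new in conversions:
--         result = result.replace(old, new)
--
--     return result
-- ===== SOURCE B (Python) =====
-- _CONVERSIONS = {
--     '%Y': 'yyyy', '%y': 'yy', '%m': 'MM', '%d': 'dd',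
--     '%H': 'HH', '%h': 'hh', '%i': 'mm', '%M': 'mm',
--     '%s': 'ss', '%S': 'ss', '%p': 'a', '%W': 'EEEE',
--     '%w': 'e', '%b': 'MMM', '%B': 'MMMM', '%j': 'DDD',
-- }
--
-- def convert_date_format_pattern(pattern: str) -> str:
--     out = []
--     i = 0
--     n = len(pattern)
--     while i < n:
--         tok = pattern[i:i + 2]
--         if pattern[i] == '%' and tok in _CONVERSIONS:
--             out.append(_CONVERSIONS[tok])
--             i += 2
--         else:
--             out.append(pattern[i])
--             i += 1
--     return ''.join(out)
-- ===== Notes on version B (the rewrite author's own statement) =====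
-- stated objective: alternative
-- what changed: Replaced 16 sequential full-string str.replace passes by a single left-to-right scan that looks each '%x' token up in a dict and copies every other character verbatim.
-- intended difference: On patterns containing '%%Y' or '%%m' A's later replace passes re-match the replacement text against the preceding literal '%' (e.g. A('%%Y')='yyyyy'), a cascade artefact of sequential replaces; B treats the first '%' as a literal and returns '%yyyy', which is the intended token-wise translation. — e.g. on convert_date_format_pattern("%%Y"): A returns "yyyyy", B returns "%yyyy"
import Mathlib
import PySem

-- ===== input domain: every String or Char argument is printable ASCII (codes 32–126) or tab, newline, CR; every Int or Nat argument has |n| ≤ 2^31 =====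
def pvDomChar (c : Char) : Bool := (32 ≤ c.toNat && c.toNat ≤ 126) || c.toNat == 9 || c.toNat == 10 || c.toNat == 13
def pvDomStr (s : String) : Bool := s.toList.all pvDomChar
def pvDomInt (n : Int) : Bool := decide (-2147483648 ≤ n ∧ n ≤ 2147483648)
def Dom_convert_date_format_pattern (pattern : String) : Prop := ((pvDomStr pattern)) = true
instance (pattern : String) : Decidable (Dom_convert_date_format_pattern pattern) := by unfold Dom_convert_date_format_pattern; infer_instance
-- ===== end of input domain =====

-- B replaces A's 16 sequential full-string replace passes by one left-to-right scan with a
-- token table; on the cascade inputs described at D_ below, B returns the intended token-wise value.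

-- ===== PORT A =====
def pvConversions : List (String × String) :=
  [("%Y", "yyyy"), ("%y", "yy"), ("%m", "MM"), ("%d", "dd"),
   ("%H", "HH"), ("%h", "hh"), ("%i", "mm"), ("%M", "mm"),
   ("%s", "ss"), ("%S", "ss"), ("%p", "a"), ("%W", "EEEE"),
   ("%w", "e"), ("%b", "MMM"), ("%B", "MMMM"), ("%j", "DDD")]

def convert_date_format_pattern (pattern : String) : String :=
  if PySem.Str.isIn "%" pattern = false then pattern
  else pvConversions.foldl (fun result p => PySem.Str.replace result p.1 p.2) pattern

-- ===== PORT B =====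
-- the dict of B, keyed by the character following '%'
def pvAltTable : List (Char × List Char) :=
  [('Y', ['y','y','y','y']), ('y', ['y','y']), ('m', ['M','M']), ('d', ['d','d']),
   ('H', ['H','H']), ('h', ['h','h']), ('i', ['m','m']), ('M', ['m','m']),
   ('s', ['s','s']), ('S', ['s','s']), ('p', ['a']), ('W', ['E','E','E','E']),
   ('w', ['e']), ('b', ['M','M','M']), ('B', ['M','M','M','M']), ('j', ['D','D','D'])]

-- B's while-loop: one pass over the characters, table lookup on '%'
def pvAltGo : List Char → List Char
  | [] => []
  | '%' :: c :: t =>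
    match pvAltTable.lookup c with
    | some r => r ++ pvAltGo t
    | none => '%' :: pvAltGo (c :: t)
  | c :: t => c :: pvAltGo t

def convert_date_format_pattern_alt (pattern : String) : String :=
  String.ofList (pvAltGo pattern.toList)

-- ===== PRECONDITION & SPEC =====
-- On patterns containing '%%Y' or '%%m' A's later replace passes re-match the replacement text
-- against the preceding literal '%' (e.g. A '%%Y' = 'yyyyy'), a cascade artefact of sequential
-- replaces; B treats the first '%' as a literal and returns '%yyyy', the intended token-wise value.
def D_convert_date_format_pattern (pattern : String) : Prop :=
  PySem.Str.isIn "%%Y" pattern = true ∨ PySem.Str.isIn "%%m" pattern = true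
instance (pattern : String) : Decidable (D_convert_date_format_pattern pattern) := by
  unfold D_convert_date_format_pattern; infer_instance

def Spec_convert_date_format_pattern (pattern : String) (out : String) : Prop :=
  ¬ D_convert_date_format_pattern pattern → out = convert_date_format_pattern_alt pattern
instance (pattern : String) (out : String) : Decidable (Spec_convert_date_format_pattern pattern out) := by
  unfold Spec_convert_date_format_pattern; infer_instance

def pvDiffWitness_convert_date_format_pattern : String := "%%Y"
def pvDiffWitnessOut_convert_date_format_pattern : String × String := ("yyyyy", "%yyyy")

-- ===== CLAIM (what is proved, stated in full; the proofs are below) =====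
def Claim_unchanged_convert_date_format_pattern : Prop :=
  ∀ (pattern : String), Dom_convert_date_format_pattern pattern →
    Spec_convert_date_format_pattern pattern (convert_date_format_pattern pattern)
def Claim_changed_convert_date_format_pattern : Prop :=
  Dom_convert_date_format_pattern (pvDiffWitness_convert_date_format_pattern) ∧
  D_convert_date_format_pattern (pvDiffWitness_convert_date_format_pattern) ∧
  convert_date_format_pattern (pvDiffWitness_convert_date_format_pattern) = pvDiffWitnessOut_convert_date_format_pattern.1 ∧
  convert_date_format_pattern_alt (pvDiffWitness_convert_date_format_pattern) = pvDiffWitnessOut_convert_date_format_pattern.2 ∧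
  pvDiffWitnessOut_convert_date_format_pattern.1 ≠ pvDiffWitnessOut_convert_date_format_pattern.2

def Claim_exact_convert_date_format_pattern : Prop :=
  ∀ (pattern : String), Dom_convert_date_format_pattern pattern →
    D_convert_date_format_pattern pattern →
    convert_date_format_pattern pattern ≠ convert_date_format_pattern_alt pattern

-- ===== LEMMAS AND PROOFS =====

-- one replace pass "result.replace ('%'+x) r", as a structural recursion
def pvRep (x : Char) (r : List Char) : List Char → List Char
  | [] => []
  | '%' :: d :: t => if d = x then r ++ pvRep x r t else '%' :: pvRep x r (d :: t)
  | c :: t => c :: pvRep x r t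

-- A's loop over the conversion table
def pvChain (ps : List (Char × List Char)) (s : List Char) : List Char :=
  ps.foldl (fun acc p => pvRep p.1 p.2 acc) s

lemma pvRep_cons (x : Char) (r t : List Char) (c : Char) (h : c ≠ '%') :
    pvRep x r (c :: t) = c :: pvRep x r t := by
  rw [pvRep.eq_def]
  split
  · simp_all
  · rename_i heq; cases heq; simp_all
  · rename_i heq; injection heq with h1 h2; subst h1; subst h2; rfl

lemma pvRep_one (x : Char) (r : List Char) : pvRep x r ['%'] = ['%'] := rfl

lemma pvRep_hit (x : Char) (r t : List Char) : pvRep x r ('%' :: x :: t) = r ++ pvRep x r t := by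
  simp [pvRep]

lemma pvRep_miss (x : Char) (r t : List Char) (d : Char) (h : d ≠ x) :
    pvRep x r ('%' :: d :: t) = '%' :: pvRep x r (d :: t) := by
  simp [pvRep, h]

-- a '%'-free prefix is copied verbatim
lemma pvRep_splice (x : Char) (r : List Char) (u v : List Char) (hu : '%' ∉ u) :
    pvRep x r (u ++ v) = u ++ pvRep x r v := by
  induction u with
  | nil => rfl
  | cons c u ih =>
    simp only [List.mem_cons, not_or] at hu
    rw [List.cons_append, pvRep_cons _ _ _ _ (fun h => hu.1 h.symm), ih hu.2]; rfl

-- '%'-run then an unmatched character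
lemma pvRep_run_cons (x : Char) (r : List Char) (c : Char) (v : List Char) (m : Nat)
    (hx : x ≠ '%') (hc : c ≠ '%') (hxc : x ≠ c) :
    pvRep x r (List.replicate m '%' ++ c :: v) = List.replicate m '%' ++ c :: pvRep x r v := by
  induction m with
  | zero => simpa using pvRep_cons x r v c hc
  | succ m ih =>
    rw [List.replicate_succ, List.cons_append]
    cases m with
    | zero =>
      simp only [List.replicate_zero, List.nil_append] at ih ⊢
      rw [pvRep_miss x r v c (fun h => hxc h.symm), pvRep_cons x r v c hc]; rfl
    | succ k =>
      have hhd : List.replicate (k + 1) '%' ++ c :: v = '%' :: (List.replicate k '%' ++ c :: v) := by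
        rw [List.replicate_succ, List.cons_append]
      rw [hhd, pvRep_miss x r _ '%' (Ne.symm hx), ← hhd, ih]
      simp

-- '%'-run then a hit
lemma pvRep_run_hit (x : Char) (r : List Char) (v : List Char) (j : Nat) (hx : x ≠ '%') :
    pvRep x r (List.replicate j '%' ++ '%' :: x :: v)
      = List.replicate j '%' ++ r ++ pvRep x r v := by
  induction j with
  | zero => simpa using pvRep_hit x r v
  | succ j ih =>
    rw [List.replicate_succ, List.cons_append]
    cases j with
    | zero =>
      simp only [List.replicate_zero, List.nil_append] at ih ⊢
      rw [pvRep_miss x r _ '%' (Ne.symm hx), pvRep_hit]; simp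
    | succ k =>
      have hhd : List.replicate (k + 1) '%' ++ '%' :: x :: v
          = '%' :: (List.replicate k '%' ++ '%' :: x :: v) := by
        rw [List.replicate_succ, List.cons_append]
      rw [hhd, pvRep_miss x r _ '%' (Ne.symm hx), ← hhd, ih]
      simp [List.replicate_succ]

-- a pure '%'-run is fixed
lemma pvRep_run (x : Char) (r : List Char) (m : Nat) (hx : x ≠ '%') :
    pvRep x r (List.replicate m '%') = List.replicate m '%' := by
  induction m with
  | zero => rfl
  | succ m ih =>
    cases m with
    | zero => simpa using pvRep_one x r
    | succ k =>
      rw [List.replicate_succ, List.replicate_succ, pvRep_miss x r _ '%' (Ne.symm hx),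
        ← List.replicate_succ, ih]

-- '%'-run, then a nonempty '%'-free block whose head this pass does not match
lemma pvRep_run_block (x : Char) (r : List Char) (uh : Char) (ut v : List Char) (j : Nat)
    (hx : x ≠ '%') (hu : '%' ∉ uh :: ut) (hj : 0 < j → x ≠ uh) :
    pvRep x r (List.replicate j '%' ++ (uh :: ut) ++ v)
      = List.replicate j '%' ++ (uh :: ut) ++ pvRep x r v := by
  simp only [List.mem_cons, not_or] at hu
  cases j with
  | zero => simpa using pvRep_splice x r (uh :: ut) v (by simp [hu.1, hu.2])
  | succ j =>
    have h1 := pvRep_run_cons x r uh (ut ++ v) (j + 1) hx (fun h => hu.1 h.symm) (hj (by omega))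
    have h2 := pvRep_splice x r ut v hu.2
    simp only [List.append_assoc, List.cons_append] at h1 ⊢
    rw [h1, h2]

-- chain equations
lemma pvChain_cons_table (p : Char × List Char) (ps : List (Char × List Char)) (s : List Char) :
    pvChain (p :: ps) s = pvChain ps (pvRep p.1 p.2 s) := rfl

lemma pvChain_cons (ps : List (Char × List Char)) (c : Char) (hc : c ≠ '%') :
    ∀ v, pvChain ps (c :: v) = c :: pvChain ps v := by
  induction ps with
  | nil => intro v; rfl
  | cons p ps ih =>
    intro v
    rw [pvChain_cons_table, pvRep_cons _ _ _ _ hc, ih, pvChain_cons_table]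

lemma pvChain_run : ∀ (ps : List (Char × List Char)) (m : Nat), (∀ p ∈ ps, p.1 ≠ '%') →
    pvChain ps (List.replicate m '%') = List.replicate m '%' := by
  intro ps
  induction ps with
  | nil => intro m _; rfl
  | cons p ps ih =>
    intro m hk
    rw [pvChain_cons_table, pvRep_run _ _ _ (hk p (by simp)), ih m (fun q hq => hk q (by simp [hq]))]

lemma pvChain_run_cons : ∀ (ps : List (Char × List Char)) (c : Char) (m : Nat),
    (∀ p ∈ ps, p.1 ≠ '%') → c ≠ '%' → (∀ p ∈ ps, p.1 ≠ c) →
    ∀ v, pvChain ps (List.replicate m '%' ++ c :: v)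
      = List.replicate m '%' ++ c :: pvChain ps v := by
  intro ps
  induction ps with
  | nil => intro c m _ _ _ v; rfl
  | cons p ps ih =>
    intro c m hk hc hnc v
    rw [pvChain_cons_table,
      pvRep_run_cons p.1 p.2 c v m (hk p (by simp)) hc (hnc p (by simp)),
      ih c m (fun q hq => hk q (by simp [hq])) hc (fun q hq => hnc q (by simp [hq])),
      pvChain_cons_table]

lemma pvChain_run_block : ∀ (ps : List (Char × List Char)) (uh : Char) (ut : List Char) (j : Nat),
    (∀ p ∈ ps, p.1 ≠ '%') → '%' ∉ uh :: ut → (0 < j → ∀ p ∈ ps, p.1 ≠ uh) →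
    ∀ v, pvChain ps (List.replicate j '%' ++ (uh :: ut) ++ v)
      = List.replicate j '%' ++ (uh :: ut) ++ pvChain ps v := by
  intro ps
  induction ps with
  | nil => intro uh ut j _ _ _ v; rfl
  | cons p ps ih =>
    intro uh ut j hk hu hj v
    rw [pvChain_cons_table,
      pvRep_run_block p.1 p.2 uh ut v j (hk p (by simp)) hu (fun h0 => hj h0 p (by simp)),
      ih uh ut j (fun q hq => hk q (by simp [hq])) hu (fun h0 q hq => hj h0 q (by simp [hq])),
      pvChain_cons_table]

-- 'no later pass matches the head of this replacement', first-match discipline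
def pvAfterOK : List (Char × List Char) → Char → Char → Bool
  | [], _, _ => true
  | p :: ps, x, rh => if p.1 = x then ps.all (fun q => q.1 ≠ rh) else pvAfterOK ps x rh

-- the token step of the whole chain
lemma pvChain_tok : ∀ (ps : List (Char × List Char)) (x rh : Char) (rt : List Char) (m : Nat),
    ps.lookup x = some (rh :: rt) → (∀ p ∈ ps, p.1 ≠ '%') → (∀ p ∈ ps, '%' ∉ p.2) →
    x ≠ '%' → (1 ≤ m → pvAfterOK ps x rh = true) →
    ∀ v, pvChain ps (List.replicate (m + 1) '%' ++ x :: v)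
      = List.replicate m '%' ++ (rh :: rt) ++ pvChain ps v := by
  intro ps
  induction ps with
  | nil => intro x rh rt m hlk; simp [List.lookup] at hlk
  | cons p ps ih =>
    intro x rh rt m hlk hk hvals hx haft v
    rcases p with ⟨y, s⟩
    by_cases hxy : x = y
    · subst hxy
      have hs : s = rh :: rt := by
        have h' := hlk
        simp only [List.lookup, BEq.rfl] at h'
        exact Option.some.inj h'
      subst hs
      have hmdec : List.replicate (m + 1) '%' ++ x :: v
          = List.replicate m '%' ++ '%' :: x :: v := by
        rw [List.replicate_succ']
        simp
      rw [pvChain_cons_table, hmdec, pvRep_run_hit x (rh :: rt) v m hx]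
      have hblk := pvChain_run_block ps rh rt m
        (fun q hq => hk q (by simp [hq]))
        (hvals (x, rh :: rt) (by simp))
        (fun h0 q hq => by
          have hthis := haft (by omega)
          simp [pvAfterOK] at hthis
          exact hthis q.1 q.2 hq)
        (pvRep x (rh :: rt) v)
      simp only [List.append_assoc, List.cons_append] at hblk ⊢
      rw [hblk, pvChain_cons_table]
    · have hlk' : ps.lookup x = some (rh :: rt) := by
        have h' := hlk
        have hbe : (x == y) = false := beq_eq_false_iff_ne.mpr hxy
        simp only [List.lookup, hbe] at h'
        exact h'
      have hy : y ≠ '%' := hk (y, s) (by simp)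
      rw [pvChain_cons_table]
      have hstep := pvRep_run_cons y s x v (m + 1) hy hx (fun h => hxy h.symm)
      simp only at hstep
      rw [hstep,
        ih x rh rt m hlk' (fun q hq => hk q (by simp [hq])) (fun q hq => hvals q (by simp [hq]))
          hx
          (fun h1 => by
            have hthis := haft h1
            simp only [pvAfterOK] at hthis
            rw [if_neg (fun h => hxy h.symm)] at hthis
            exact hthis) (pvRep y s v),
        pvChain_cons_table]

-- scan equations
lemma pvAltGo_cons (c : Char) (t : List Char) (hc : c ≠ '%') :
    pvAltGo (c :: t) = c :: pvAltGo t := by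
  rw [pvAltGo.eq_def]
  split
  · simp_all
  · rename_i heq; cases heq; simp_all
  · rename_i heq; injection heq with h1 h2; subst h1; subst h2; rfl

lemma pvAltGo_hit (c : Char) (t r : List Char) (h : pvAltTable.lookup c = some r) :
    pvAltGo ('%' :: c :: t) = r ++ pvAltGo t := by
  simp [pvAltGo, h]

lemma pvAltGo_miss (c : Char) (t : List Char) (h : pvAltTable.lookup c = none) :
    pvAltGo ('%' :: c :: t) = '%' :: pvAltGo (c :: t) := by
  simp [pvAltGo, h]

lemma pvAltGo_pp (t : List Char) : pvAltGo ('%' :: '%' :: t) = '%' :: pvAltGo ('%' :: t) :=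
  pvAltGo_miss '%' t (by decide)

lemma pvAltGo_run (m : Nat) : pvAltGo (List.replicate m '%') = List.replicate m '%' := by
  induction m with
  | zero => rfl
  | succ m ih =>
    cases m with
    | zero => rfl
    | succ k =>
      have e2 : List.replicate (k + 2) '%' = '%' :: '%' :: List.replicate k '%' := by
        simp [List.replicate_succ]
      have e1 : List.replicate (k + 1) '%' = '%' :: List.replicate k '%' := by
        simp [List.replicate_succ]
      rw [e2, pvAltGo_pp, ← e1, ih]

lemma pvAltGo_run_cons (c : Char) (m : Nat) (hc : c ≠ '%') (hlk : pvAltTable.lookup c = none) :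
    ∀ v, pvAltGo (List.replicate m '%' ++ c :: v) = List.replicate m '%' ++ c :: pvAltGo v := by
  induction m with
  | zero => intro v; simpa using pvAltGo_cons c v hc
  | succ m ih =>
    intro v
    rw [List.replicate_succ, List.cons_append]
    cases m with
    | zero =>
      simp only [List.replicate_zero, List.nil_append] at ih ⊢
      rw [pvAltGo_miss c v hlk, pvAltGo_cons c v hc]; rfl
    | succ k =>
      have hhd : List.replicate (k + 1) '%' ++ c :: v = '%' :: (List.replicate k '%' ++ c :: v) := by
        rw [List.replicate_succ, List.cons_append]
      rw [hhd, pvAltGo_pp, ← hhd, ih]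
      simp

lemma pvAltGo_run_hit (c : Char) (r : List Char) (m : Nat)
    (hlk : pvAltTable.lookup c = some r) :
    ∀ v, pvAltGo (List.replicate (m + 1) '%' ++ c :: v)
      = List.replicate m '%' ++ r ++ pvAltGo v := by
  induction m with
  | zero => intro v; simpa using pvAltGo_hit c v r hlk
  | succ k ih =>
    intro v
    have hhd : List.replicate (k + 2) '%' ++ c :: v
        = '%' :: (List.replicate (k + 1) '%' ++ c :: v) := by
      rw [List.replicate_succ, List.cons_append]
    have e1 : List.replicate (k + 1) '%' ++ c :: v = '%' :: (List.replicate k '%' ++ c :: v) := by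
      rw [List.replicate_succ, List.cons_append]
    rw [hhd, e1, pvAltGo_pp, ← e1, ih v]
    simp [List.replicate_succ]

-- decomposition into a leading '%'-run and a rest not starting with '%'
lemma pvDecomp : ∀ s : List Char, ∃ m rest, s = List.replicate m '%' ++ rest ∧
    (∀ c v, rest = c :: v → c ≠ '%') := by
  intro s
  induction s with
  | nil => exact ⟨0, [], rfl, by simp⟩
  | cons c t ih =>
    by_cases hc : c = '%'
    · obtain ⟨m, rest, h1, h2⟩ := ih
      exact ⟨m + 1, rest, by rw [List.replicate_succ, List.cons_append, ← h1, hc], h2⟩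
    · exact ⟨0, c :: t, by simp, fun c' v hv => by cases hv; exact hc⟩

lemma pvLookupNone : ∀ (l : List (Char × List Char)) (c : Char), l.lookup c = none →
    ∀ p ∈ l, p.1 ≠ c := by
  intro l
  induction l with
  | nil => simp
  | cons p ps ih =>
    intro c h q hq
    by_cases hpc : c = p.1
    · simp [List.lookup, hpc] at h
    · rcases List.mem_cons.mp hq with hq' | hq'
      · subst hq'; exact fun he => hpc he.symm
      · have hbe : (c == p.1) = false := beq_eq_false_iff_ne.mpr hpc
        exact ih c (by simpa [List.lookup, hbe] using h) q hq'

lemma pvLookupMem (l : List (Char × List Char)) (c : Char) (r : List Char)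
    (h : l.lookup c = some r) : (c, r) ∈ l := by
  obtain ⟨l1, l2, hl, -⟩ := List.lookup_eq_some_iff.mp h
  subst hl; simp

lemma pvAfterOK_of (c : Char) (r : List Char) (hk : pvAltTable.lookup c = some r)
    (hY : c ≠ 'Y') (hm : c ≠ 'm') (rh : Char) (rt : List Char) (hr : r = rh :: rt) :
    pvAfterOK pvAltTable c rh = true := by
  have hmem := pvLookupMem _ _ _ hk
  subst hr
  fin_cases hmem <;> simp_all <;> decide

lemma pvValNeNil (c : Char) (r : List Char) (hk : pvAltTable.lookup c = some r) : r ≠ [] := by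
  have hmem := pvLookupMem _ _ _ hk
  fin_cases hmem <;> simp

-- main equivalence on the character level
lemma pvMain : ∀ (n : Nat) (s : List Char), s.length ≤ n →
    ¬ (['%', '%', 'Y'] <:+: s) → ¬ (['%', '%', 'm'] <:+: s) →
    pvChain pvAltTable s = pvAltGo s := by
  intro n
  induction n with
  | zero =>
    intro s hs _ _
    have : s = [] := by cases s <;> simp_all
    subst this; rfl
  | succ n ih =>
    intro s hs h1 h2
    obtain ⟨m, rest, hsd, hrest⟩ := pvDecomp s
    cases rest with
    | nil =>
      subst hsd
      simp only [List.append_nil]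
      rw [pvChain_run _ _ (by decide), pvAltGo_run]
    | cons c v =>
      have hc : c ≠ '%' := hrest c v rfl
      have hvinf : v <:+: s := ⟨List.replicate m '%' ++ [c], [], by simp [hsd]⟩
      have h1v : ¬ (['%', '%', 'Y'] <:+: v) := fun h => h1 (h.trans hvinf)
      have h2v : ¬ (['%', '%', 'm'] <:+: v) := fun h => h2 (h.trans hvinf)
      have hlenv : v.length ≤ n := by
        have hl := hs; rw [hsd] at hl; simp at hl; omega
      subst hsd
      cases m with
      | zero =>
        simp only [List.replicate_zero, List.nil_append]
        rw [pvChain_cons _ _ hc, pvAltGo_cons _ _ hc, ih v hlenv h1v h2v]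
      | succ m' =>
        cases hk : pvAltTable.lookup c with
        | none =>
          rw [pvChain_run_cons _ _ _ (by decide) hc (pvLookupNone _ _ hk),
            pvAltGo_run_cons _ _ hc hk, ih v hlenv h1v h2v]
        | some r =>
          have hrne := pvValNeNil _ _ hk
          rcases r with - | ⟨rh, rt⟩
          · exact absurd rfl hrne
          have hinfix2 : 2 ≤ m' + 1 →
              (['%', '%', c] <:+: (List.replicate (m' + 1) '%' ++ c :: v)) := by
            intro hm2
            refine ⟨List.replicate (m' + 1 - 2) '%', v, ?_⟩
            have hmeq : m' + 1 = (m' + 1 - 2) + 2 := by omega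
            rw [hmeq, List.replicate_add]
            simp
          have haft : 1 ≤ m' → pvAfterOK pvAltTable c rh = true := by
            intro hm1
            by_cases hcY : c = 'Y'
            · exact absurd (hcY ▸ hinfix2 (by omega)) h1
            by_cases hcm : c = 'm'
            · exact absurd (hcm ▸ hinfix2 (by omega)) h2
            exact pvAfterOK_of c (rh :: rt) hk hcY hcm rh rt rfl
          rw [pvChain_tok pvAltTable c rh rt m' hk (by decide) (by decide) hc haft,
            pvAltGo_run_hit c (rh :: rt) m' hk, ih v hlenv h1v h2v]

-- bridge: the PySem replace with a two-character '%x' pattern is pvRep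
lemma pvGo_eq (x : Char) (r : List Char) : ∀ (fuel : Nat) (l acc : List Char),
    l.length ≤ fuel →
    PySem.Chars.replace.go ['%', x] r fuel l acc = acc.reverse ++ pvRep x r l := by
  intro fuel
  induction fuel with
  | zero =>
    intro l acc h
    have : l = [] := by cases l <;> simp_all
    subst this
    simp [PySem.Chars.replace.go, pvRep]
  | succ n ih =>
    intro l acc h
    cases l with
    | nil => simp [PySem.Chars.replace.go, pvRep]
    | cons cs t =>
      by_cases hcs : cs = '%'
      · subst hcs
        cases t with
        | nil =>
          have hpre : List.isPrefixOf ['%', x] ['%'] = false := by simp [List.isPrefixOf]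
          simp only [PySem.Chars.replace.go, hpre, Bool.false_eq_true, if_false]
          rw [ih [] ('%' :: acc) (by simp)]
          simp [pvRep_one, show pvRep x r [] = [] from rfl]
        | cons d t' =>
          by_cases hd : d = x
          · subst hd
            have hpre : List.isPrefixOf ['%', d] ('%' :: d :: t') = true := by
              simp [List.isPrefixOf]
            simp only [PySem.Chars.replace.go, hpre, if_true]
            rw [ih]
            · simp [pvRep_hit]
            · simp at h ⊢; omega
          · have hpre : List.isPrefixOf ['%', x] ('%' :: d :: t') = false := by
              simp [List.isPrefixOf, Ne.symm hd]
            simp only [PySem.Chars.replace.go, hpre, Bool.false_eq_true, if_false]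
            rw [ih (d :: t') ('%' :: acc) (by simp at h ⊢; omega)]
            simp [pvRep_miss x r t' d hd]
      · have hpre : List.isPrefixOf ['%', x] (cs :: t) = false := by
          simp [List.isPrefixOf, Ne.symm hcs]
        simp only [PySem.Chars.replace.go, hpre, Bool.false_eq_true, if_false]
        rw [ih t (cs :: acc) (by simp at h ⊢; omega)]
        simp [pvRep_cons x r t cs hcs]

lemma pvReplace_eq (s : List Char) (x : Char) (r : List Char) :
    PySem.Chars.replace s ['%', x] r = pvRep x r s := by
  unfold PySem.Chars.replace
  simp only [List.isEmpty_cons, Bool.false_eq_true, if_false]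
  simpa using pvGo_eq x r s.length s [] le_rfl

-- A's fold over string pairs, on the list level
lemma pvChainBridge (s : String) :
    (pvConversions.foldl (fun result p => PySem.Str.replace result p.1 p.2) s).toList
      = pvChain pvAltTable s.toList := by
  simp only [pvConversions, pvAltTable, pvChain, List.foldl_cons, List.foldl_nil,
    PySem.Str.toList_replace]
  simp [pvReplace_eq]

lemma pvAltGo_noPct (s : List Char) (h : '%' ∉ s) : pvAltGo s = s := by
  induction s with
  | nil => rfl
  | cons c t ih =>
    simp only [List.mem_cons, not_or] at h
    rw [pvAltGo_cons c t (fun h2 => h.1 h2.symm), ih h.2]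

-- ==== tightness: inside D_ the two programs always differ ('%'-count strictly drops) ====

def pvRest14 : List (Char × List Char) :=
  [('m', ['M','M']), ('d', ['d','d']), ('H', ['H','H']), ('h', ['h','h']),
   ('i', ['m','m']), ('M', ['m','m']), ('s', ['s','s']), ('S', ['s','s']),
   ('p', ['a']), ('W', ['E','E','E','E']), ('w', ['e']), ('b', ['M','M','M']),
   ('B', ['M','M','M','M']), ('j', ['D','D','D'])]

def pvRest8 : List (Char × List Char) :=
  [('s', ['s','s']), ('S', ['s','s']), ('p', ['a']), ('W', ['E','E','E','E']),
   ('w', ['e']), ('b', ['M','M','M']), ('B', ['M','M','M','M']), ('j', ['D','D','D'])]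

lemma pvTableSplitY : pvAltTable = ('Y', ['y','y','y','y']) :: ('y', ['y','y']) :: pvRest14 := rfl

lemma pvTableSplitM : pvAltTable = ('Y', ['y','y','y','y']) :: ('y', ['y','y']) :: ('m', ['M','M'])
    :: ('d', ['d','d']) :: ('H', ['H','H']) :: ('h', ['h','h']) :: ('i', ['m','m'])
    :: ('M', ['m','m']) :: pvRest8 := rfl

lemma pvChain_cascY (m : Nat) (v : List Char) :
    pvChain pvAltTable (List.replicate (m + 2) '%' ++ 'Y' :: v)
      = List.replicate m '%' ++ ['y','y','y','y','y'] ++ pvChain pvAltTable v := by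
  rw [pvTableSplitY, pvChain_cons_table]
  have e1 : ∀ Z : List Char, List.replicate (m + 2) '%' ++ 'Y' :: Z
      = List.replicate (m + 1) '%' ++ '%' :: 'Y' :: Z := by
    intro Z
    rw [show m + 2 = (m + 1) + 1 from rfl, List.replicate_succ']
    simp
  rw [e1, pvRep_run_hit 'Y' ['y','y','y','y'] v (m + 1) (by decide), pvChain_cons_table]
  have e2 : ∀ Z : List Char,
      List.replicate (m + 1) '%' ++ ['y','y','y','y'] ++ Z
        = List.replicate m '%' ++ '%' :: 'y' :: (['y','y','y'] ++ Z) := by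
    intro Z
    rw [List.replicate_succ']
    simp
  rw [e2, pvRep_run_hit 'y' ['y','y'] _ m (by decide),
    pvRep_splice 'y' ['y','y'] ['y','y','y'] _ (by decide)]
  rw [show pvChain (('Y', ['y','y','y','y']) :: ('y', ['y','y']) :: pvRest14) v
      = pvChain pvRest14 (pvRep 'y' ['y','y'] (pvRep 'Y' ['y','y','y','y'] v)) from rfl]
  have hblk := pvChain_run_block pvRest14 'y' ['y','y','y','y'] m (by decide) (by decide)
      (fun _ => by decide) (pvRep 'y' ['y','y'] (pvRep 'Y' ['y','y','y','y'] v))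
  simp only [List.append_assoc, List.cons_append] at hblk ⊢
  exact hblk

lemma pvChain_cascM (m : Nat) (v : List Char) :
    pvChain pvAltTable (List.replicate (m + 2) '%' ++ 'm' :: v)
      = List.replicate m '%' ++ ['m','m','M'] ++ pvChain pvAltTable v := by
  rw [pvTableSplitM, pvChain_cons_table,
    pvRep_run_cons 'Y' ['y','y','y','y'] 'm' v (m + 2) (by decide) (by decide) (by decide),
    pvChain_cons_table,
    pvRep_run_cons 'y' ['y','y'] 'm' _ (m + 2) (by decide) (by decide) (by decide),
    pvChain_cons_table]
  have e1 : ∀ Z : List Char, List.replicate (m + 2) '%' ++ 'm' :: Z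
      = List.replicate (m + 1) '%' ++ '%' :: 'm' :: Z := by
    intro Z
    rw [show m + 2 = (m + 1) + 1 from rfl, List.replicate_succ']
    simp
  rw [e1, pvRep_run_hit 'm' ['M','M'] _ (m + 1) (by decide), pvChain_cons_table,
    pvRep_run_block 'd' ['d','d'] 'M' ['M'] _ (m + 1) (by decide) (by decide) (fun _ => by decide),
    pvChain_cons_table,
    pvRep_run_block 'H' ['H','H'] 'M' ['M'] _ (m + 1) (by decide) (by decide) (fun _ => by decide),
    pvChain_cons_table,
    pvRep_run_block 'h' ['h','h'] 'M' ['M'] _ (m + 1) (by decide) (by decide) (fun _ => by decide),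
    pvChain_cons_table,
    pvRep_run_block 'i' ['m','m'] 'M' ['M'] _ (m + 1) (by decide) (by decide) (fun _ => by decide),
    pvChain_cons_table]
  have e2 : ∀ Z : List Char, List.replicate (m + 1) '%' ++ ['M','M'] ++ Z
      = List.replicate m '%' ++ '%' :: 'M' :: ('M' :: Z) := by
    intro Z
    rw [List.replicate_succ']
    simp
  rw [e2, pvRep_run_hit 'M' ['m','m'] _ m (by decide),
    pvRep_cons 'M' ['m','m'] _ 'M' (by decide)]
  have hv8 : pvChain (('Y', ['y','y','y','y']) :: ('y', ['y','y']) :: ('m', ['M','M'])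
        :: ('d', ['d','d']) :: ('H', ['H','H']) :: ('h', ['h','h']) :: ('i', ['m','m'])
        :: ('M', ['m','m']) :: pvRest8) v
      = pvChain pvRest8 (pvRep 'M' ['m','m'] (pvRep 'i' ['m','m'] (pvRep 'h' ['h','h']
          (pvRep 'H' ['H','H'] (pvRep 'd' ['d','d'] (pvRep 'm' ['M','M'] (pvRep 'y' ['y','y']
            (pvRep 'Y' ['y','y','y','y'] v)))))))) := by
    simp only [pvChain_cons_table]
  rw [hv8]
  have hblk := pvChain_run_block pvRest8 'm' ['m','M'] m (by decide) (by decide)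
      (fun _ => by decide)
      (pvRep 'M' ['m','m'] (pvRep 'i' ['m','m'] (pvRep 'h' ['h','h']
        (pvRep 'H' ['H','H'] (pvRep 'd' ['d','d'] (pvRep 'm' ['M','M'] (pvRep 'y' ['y','y']
          (pvRep 'Y' ['y','y','y','y'] v))))))))
  simp only [List.append_assoc, List.cons_append] at hblk ⊢
  exact hblk

lemma pvValNoPct (c : Char) (r : List Char) (hk : pvAltTable.lookup c = some r) : '%' ∉ r := by
  have hmem := pvLookupMem _ _ _ hk
  fin_cases hmem <;> simp

lemma pvInfixRun (k c : Char) (m : Nat) (v : List Char) (hk : k ≠ '%') (hc : c ≠ '%')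
    (h : ['%', '%', k] <:+: (List.replicate m '%' ++ c :: v)) :
    (2 ≤ m ∧ c = k) ∨ (['%', '%', k] <:+: v) := by
  induction m with
  | zero =>
    simp only [List.replicate_zero, List.nil_append] at h
    rcases List.infix_cons_iff.mp h with hp | hi
    · rw [List.cons_prefix_cons] at hp
      exact absurd hp.1.symm hc
    · exact Or.inr hi
  | succ m ih =>
    rw [List.replicate_succ, List.cons_append] at h
    rcases List.infix_cons_iff.mp h with hp | hi
    · rw [List.cons_prefix_cons] at hp
      have hp2 := hp.2
      cases m with
      | zero =>
        simp only [List.replicate_zero, List.nil_append, List.cons_prefix_cons] at hp2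
        exact absurd hp2.1.symm hc
      | succ m' =>
        rw [List.replicate_succ, List.cons_append, List.cons_prefix_cons] at hp2
        have hp3 := hp2.2
        cases m' with
        | zero =>
          simp only [List.replicate_zero, List.nil_append, List.cons_prefix_cons] at hp3
          exact Or.inl ⟨by omega, hp3.1.symm⟩
        | succ m'' =>
          rw [List.replicate_succ, List.cons_append, List.cons_prefix_cons] at hp3
          exact absurd hp3.1 hk
    · rcases ih hi with ⟨h2, hck⟩ | hv
      · exact Or.inl ⟨by omega, hck⟩
      · exact Or.inr hv

lemma pvNoCascRun (k : Char) (hk : k ≠ '%') (m : Nat) :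
    ¬ (['%', '%', k] <:+: List.replicate m '%') := fun h =>
  hk (List.eq_of_mem_replicate (h.subset (by simp)))

lemma pvCntLt : ∀ (n : Nat) (s : List Char), s.length ≤ n →
    ((['%', '%', 'Y'] <:+: s) ∨ (['%', '%', 'm'] <:+: s)) →
    (pvChain pvAltTable s).count '%' < (pvAltGo s).count '%' := by
  intro n
  induction n with
  | zero =>
    intro s hs hD
    have : s = [] := by cases s <;> simp_all
    subst this
    rcases hD with h | h <;> simp [List.infix_nil] at h
  | succ n ih =>
    intro s hs hD
    obtain ⟨m, rest, hsd, hrest⟩ := pvDecomp s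
    cases rest with
    | nil =>
      subst hsd
      simp only [List.append_nil] at hD
      rcases hD with h | h
      · exact absurd h (pvNoCascRun 'Y' (by decide) m)
      · exact absurd h (pvNoCascRun 'm' (by decide) m)
    | cons c v =>
      have hc : c ≠ '%' := hrest c v rfl
      have hlenv : v.length ≤ n := by
        rw [hsd] at hs; simp at hs; omega
      subst hsd
      have hle : (pvChain pvAltTable v).count '%' ≤ (pvAltGo v).count '%' := by
        by_cases hDv : (['%', '%', 'Y'] <:+: v) ∨ (['%', '%', 'm'] <:+: v)
        · exact le_of_lt (ih v hlenv hDv)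
        · rw [pvMain v.length v le_rfl (fun h => hDv (Or.inl h)) (fun h => hDv (Or.inr h))]
      by_cases hbY : 2 ≤ m ∧ c = 'Y'
      · obtain ⟨hm2, rfl⟩ := hbY
        obtain ⟨m'', rfl⟩ : ∃ m'', m = m'' + 2 := ⟨m - 2, by omega⟩
        rw [pvChain_cascY, show (m'' + 2) = (m'' + 1) + 1 from rfl,
          pvAltGo_run_hit 'Y' ['y','y','y','y'] (m'' + 1) (by decide)]
        simp [List.count_append, List.count_replicate, List.count_cons]
        omega
      by_cases hbM : 2 ≤ m ∧ c = 'm'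
      · obtain ⟨hm2, rfl⟩ := hbM
        obtain ⟨m'', rfl⟩ : ∃ m'', m = m'' + 2 := ⟨m - 2, by omega⟩
        rw [pvChain_cascM, show (m'' + 2) = (m'' + 1) + 1 from rfl,
          pvAltGo_run_hit 'm' ['M','M'] (m'' + 1) (by decide)]
        simp [List.count_append, List.count_replicate, List.count_cons]
        omega
      have hv : (['%', '%', 'Y'] <:+: v) ∨ (['%', '%', 'm'] <:+: v) := by
        rcases hD with h | h
        · rcases pvInfixRun 'Y' c m v (by decide) hc h with hb | hv
          · exact absurd hb hbY
          · exact Or.inl hv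
        · rcases pvInfixRun 'm' c m v (by decide) hc h with hb | hv
          · exact absurd hb hbM
          · exact Or.inr hv
      have hlt := ih v hlenv hv
      have hcne : (c == '%') = false := beq_eq_false_iff_ne.mpr hc
      cases hk : pvAltTable.lookup c with
      | none =>
        rw [pvChain_run_cons _ _ _ (by decide) hc (pvLookupNone _ _ hk),
          pvAltGo_run_cons _ _ hc hk]
        simp [List.count_append, List.count_replicate, List.count_cons, hcne]
        omega
      | some r =>
        have hnp : '%' ∉ r := pvValNoPct c r hk
        have hrne := pvValNeNil _ _ hk
        rcases hrr : r with - | ⟨rh, rt⟩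
        · exact absurd hrr hrne
        subst hrr
        cases m with
        | zero =>
          simp only [List.replicate_zero, List.nil_append]
          rw [pvChain_cons _ _ hc, pvAltGo_cons _ _ hc]
          simp [List.count_cons, hcne]
          omega
        | succ m' =>
          have haft : 1 ≤ m' → pvAfterOK pvAltTable c rh = true := by
            intro h1
            have hcY : c ≠ 'Y' := fun he => hbY ⟨by omega, he⟩
            have hcm : c ≠ 'm' := fun he => hbM ⟨by omega, he⟩
            exact pvAfterOK_of c (rh :: rt) hk hcY hcm rh rt rfl
          rw [pvChain_tok pvAltTable c rh rt m' hk (by decide) (by decide) hc haft,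
            pvAltGo_run_hit c (rh :: rt) m' hk]
          have hrh : (rh == '%') = false :=
            beq_eq_false_iff_ne.mpr (fun h => hnp (by simp [h]))
          have hrt : rt.count '%' = 0 := List.count_eq_zero.mpr (fun h => hnp (by simp [h]))
          simp [List.count_append, List.count_replicate, List.count_cons, hrh, hrt]
          omega

-- ===== VERDICT (by name: the statement is the Claim_ definition above) =====
theorem convert_date_format_pattern_spec : Claim_unchanged_convert_date_format_pattern := by
  intro pattern _ hnD
  unfold D_convert_date_format_pattern at hnD
  rw [not_or] at hnD
  have h1 : ¬ (['%', '%', 'Y'] <:+: pattern.toList) := by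
    intro hinf
    exact hnD.1 ((PySem.Str.isIn_iff_infix _ _).mpr (by simpa using hinf))
  have h2 : ¬ (['%', '%', 'm'] <:+: pattern.toList) := by
    intro hinf
    exact hnD.2 ((PySem.Str.isIn_iff_infix _ _).mpr (by simpa using hinf))
  show convert_date_format_pattern pattern = convert_date_format_pattern_alt pattern
  unfold convert_date_format_pattern convert_date_format_pattern_alt
  by_cases hin : PySem.Str.isIn "%" pattern = false
  · rw [if_pos hin]
    have hnp : '%' ∉ pattern.toList := by
      intro hmem
      have ht : PySem.Str.isIn "%" pattern = true :=
        (PySem.Str.isIn_iff_infix _ _).mpr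
          (by simpa using (List.singleton_infix_iff '%' pattern.toList).mpr hmem)
      rw [ht] at hin; cases hin
    rw [pvAltGo_noPct _ hnp, String.ofList_toList]
  · rw [if_neg hin]
    have hbr := pvChainBridge pattern
    have hmain := pvMain pattern.toList.length pattern.toList le_rfl h1 h2
    calc pvConversions.foldl (fun result p => PySem.Str.replace result p.1 p.2) pattern
        = String.ofList ((pvConversions.foldl
            (fun result p => PySem.Str.replace result p.1 p.2) pattern).toList) :=
          (String.ofList_toList).symm
      _ = String.ofList (pvAltGo pattern.toList) := by rw [hbr, hmain]

set_option maxRecDepth 16384 in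
theorem convert_date_format_pattern_changed : Claim_changed_convert_date_format_pattern := by
  unfold Claim_changed_convert_date_format_pattern; decide

theorem convert_date_format_pattern_tight : Claim_exact_convert_date_format_pattern := by
  intro pattern _ hD hEq
  have hD' : (['%', '%', 'Y'] <:+: pattern.toList) ∨ (['%', '%', 'm'] <:+: pattern.toList) := by
    rcases hD with h | h
    · exact Or.inl (by simpa using (PySem.Str.isIn_iff_infix _ _).mp h)
    · exact Or.inr (by simpa using (PySem.Str.isIn_iff_infix _ _).mp h)
  have hpct : '%' ∈ pattern.toList := by
    rcases hD' with h | h <;> exact h.subset (by simp)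
  have hin : PySem.Str.isIn "%" pattern = true :=
    (PySem.Str.isIn_iff_infix _ _).mpr
      (by simpa using (List.singleton_infix_iff '%' pattern.toList).mpr hpct)
  have hlt := pvCntLt pattern.toList.length pattern.toList le_rfl hD'
  have hA : (convert_date_format_pattern pattern).toList = pvChain pvAltTable pattern.toList := by
    unfold convert_date_format_pattern
    have hguard : ¬ (PySem.Str.isIn "%" pattern = false) := by rw [hin]; simp
    rw [if_neg hguard]
    exact pvChainBridge pattern
  have hB : (convert_date_format_pattern_alt pattern).toList = pvAltGo pattern.toList := by
    unfold convert_date_format_pattern_alt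
    exact String.toList_ofList
  have heq2 : pvChain pvAltTable pattern.toList = pvAltGo pattern.toList := by
    rw [← hA, hEq, hB]
  rw [heq2] at hlt
  exact lt_irrefl _ hlt
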